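-- pv_equiv track=rewrite | github.com/RitamSaha001/lalacore-omega | core/multimodal/lc_iie_engine.py | _balance_parentheses
-- ===== SOURCE A (Python) =====
-- from typing import Any, Dict, Iterable, List, Sequence
--
-- def _balance_parentheses(text: str) -> str:
--     out_chars: List[str] = []
--     depth = 0
--     for ch in text:
--         if ch == "(":
--             depth += 1
--             out_chars.append(ch)
--         elif ch == ")":
--             if depth <= 0:
--                 continue
--             depth -= 1
--             out_chars.append(ch)
--         else:
--             out_chars.append(ch)
--     if depth > 0:
--         out_chars.extend(")" * depth)
--     return "".join(out_chars)
-- ===== SOURCE B (Python) =====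
-- def _balance_parentheses(text: str) -> str:
--     # Stack of nested segment buffers: '(' opens a fresh buffer, ')' closes the
--     # top buffer and splices the finished parenthesised group into its parent (a ')'
--     # with no open group is dropped); leftover open groups are closed
--     # innermost-first at the end. The output is assembled hierarchically from
--     # completed groups instead of char-by-char with a depth counter.
--     stack = [[]]
--     for ch in text:
--         if ch == "(":
--             stack.append([])
--         elif ch == ")":
--             if len(stack) > 1:
--                 inner = stack.pop()
--                 stack[-1].append("(" + "".join(inner) + ")")
--         else:
--             stack[-1].append(ch)
--     while len(stack) > 1:
--         inner = stack.pop()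
--         stack[-1].append("(" + "".join(inner) + ")")
--     return "".join(stack[0])
-- ===== Notes on version B (the rewrite author's own statement) =====
-- stated objective: alternative
-- what changed: B replaces A's flat char-by-char loop with a depth counter by a stack of nested group buffers: an opening paren pushes a fresh buffer, a closing paren pops the top buffer and splices the finished parenthesised group into its parent (or is dropped when no group is open), and leftover open groups are closed innermost-first at the end, so the output is assembled hierarchically from completed groups.
import Mathlib
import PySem

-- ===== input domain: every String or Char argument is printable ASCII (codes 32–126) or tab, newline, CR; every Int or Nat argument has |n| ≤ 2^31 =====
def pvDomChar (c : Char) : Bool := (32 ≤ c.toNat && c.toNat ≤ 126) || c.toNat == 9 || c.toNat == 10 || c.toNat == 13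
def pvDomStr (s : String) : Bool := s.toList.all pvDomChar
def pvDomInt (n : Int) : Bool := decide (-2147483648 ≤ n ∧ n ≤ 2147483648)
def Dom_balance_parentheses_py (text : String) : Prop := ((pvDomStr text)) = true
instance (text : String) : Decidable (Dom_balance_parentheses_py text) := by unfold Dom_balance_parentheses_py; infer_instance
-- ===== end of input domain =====

-- B assembles the output from a stack of nested group buffers, splicing each finished
-- parenthesised group into its parent, instead of A's flat char-by-char loop with a depth
-- counter; objective: alternative (same cost, different data structure).


-- ===== PORT A =====
-- A's loop state: accumulated output chars and the clipped depth counter.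
def pvStepA (s : List Char × Int) (ch : Char) : List Char × Int :=
  if ch = '(' then (s.1 ++ [ch], s.2 + 1)
  else if ch = ')' then
    if s.2 ≤ 0 then s
    else (s.1 ++ [ch], s.2 - 1)
  else (s.1 ++ [ch], s.2)

def balance_parentheses_py (text : String) : String :=
  let st := text.toList.foldl pvStepA ([], 0)
  String.mk (if st.2 > 0 then st.1 ++ List.replicate st.2.toNat ')' else st.1)

-- ===== PORT B =====
-- B's loop state: a stack of group buffers, head = innermost open group.
def pvStepB (s : List (List Char)) (ch : Char) : List (List Char) :=
  if ch = '(' then [] :: s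
  else if ch = ')' then
    match s with
    | t :: p :: rest => (p ++ '(' :: t ++ [')']) :: rest
    | _ => s
  else
    match s with
    | t :: rest => (t ++ [ch]) :: rest
    | [] => s

-- the final while loop: close leftover open groups innermost-first
def pvClose : List (List Char) → List Char
  | [] => []
  | [t] => t
  | t :: p :: rest => pvClose ((p ++ '(' :: t ++ [')']) :: rest)
termination_by s => s.length

def balance_parentheses_py_alt (text : String) : String :=
  String.mk (pvClose (text.toList.foldl pvStepB [[]]))

-- ===== PRECONDITION & SPEC =====
def Spec_balance_parentheses_py (text : String) (out : String) : Prop := out = balance_parentheses_py_alt text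
instance (text : String) (out : String) : Decidable (Spec_balance_parentheses_py text out) := by unfold Spec_balance_parentheses_py; infer_instance

-- ===== CLAIM (what is proved, stated in full; the proofs are below) =====
def Claim_equal_balance_parentheses_py : Prop := ∀ (text : String), Dom_balance_parentheses_py text → Spec_balance_parentheses_py text (balance_parentheses_py text)

-- ===== LEMMAS AND PROOFS =====
-- pvSquash flattens B's stack into A's output-so-far: bottom buffer, then '(' before each
-- higher buffer (those '(' are the unmatched opens A has already emitted).
def pvSquash : List (List Char) → List Char
  | [] => []
  | [t] => t
  | t :: rest => pvSquash rest ++ '(' :: t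

theorem pvSquash_cons (t : List Char) (rest : List (List Char)) (h : rest ≠ []) :
    pvSquash (t :: rest) = pvSquash rest ++ '(' :: t := by
  cases rest with
  | nil => exact absurd rfl h
  | cons a as => rfl

theorem pvSquash_merge (t p : List Char) (rest : List (List Char)) :
    pvSquash ((p ++ '(' :: t ++ [')']) :: rest) = pvSquash (t :: p :: rest) ++ [')'] := by
  cases rest with
  | nil => simp [pvSquash]
  | cons a as =>
    rw [pvSquash_cons (p ++ '(' :: t ++ [')']) (a :: as) (by simp),
        pvSquash_cons t (p :: a :: as) (by simp),
        pvSquash_cons p (a :: as) (by simp)]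
    simp

theorem pvSquash_push (t0 : List Char) (ch : Char) (rest : List (List Char)) :
    pvSquash ((t0 ++ [ch]) :: rest) = pvSquash (t0 :: rest) ++ [ch] := by
  cases rest with
  | nil => rfl
  | cons a as =>
    rw [pvSquash_cons (t0 ++ [ch]) (a :: as) (by simp),
        pvSquash_cons t0 (a :: as) (by simp)]
    simp

-- closing leftover groups appends exactly one ')' per leftover open
theorem pvClose_eq (n : Nat) : ∀ (s : List (List Char)), s.length ≤ n → s ≠ [] →
    pvClose s = pvSquash s ++ List.replicate (s.length - 1) ')' := by
  induction n with
  | zero => intro s hs hne; cases s with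
    | nil => exact absurd rfl hne
    | cons a as => simp at hs
  | succ n ih =>
    intro s hs hne
    match s with
    | [t] => simp [pvClose, pvSquash]
    | t :: p :: rest =>
      rw [pvClose]
      rw [ih _ (by simpa using Nat.le_of_succ_le_succ hs) (by simp)]
      rw [pvSquash_merge]
      simp
      rw [← List.replicate_succ, List.replicate_succ']

-- Loop invariant: A's state is (pvSquash of B's stack, stack height − 1), and the stack stays nonempty.
theorem pv_inv (l : List Char) (s : List (List Char)) (hs : s ≠ []) :
    l.foldl pvStepA (pvSquash s, (s.length : Int) - 1)
      = (pvSquash (l.foldl pvStepB s), ((l.foldl pvStepB s).length : Int) - 1)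
    ∧ l.foldl pvStepB s ≠ [] := by
  induction l generalizing s with
  | nil => exact ⟨rfl, hs⟩
  | cons ch rest ih =>
    simp only [List.foldl_cons]
    by_cases h1 : ch = '('
    · have step : pvStepA (pvSquash s, (s.length : Int) - 1) ch
          = (pvSquash ([] :: s), ((([] :: s) : List (List Char)).length : Int) - 1) := by
        simp [pvStepA, h1, pvSquash_cons _ _ hs]
      rw [step, show pvStepB s ch = [] :: s by simp [pvStepB, h1]]
      exact ih ([] :: s) (by simp)
    · by_cases h2 : ch = ')'
      · match s with
        | [t] =>
          have step : pvStepA (pvSquash [t], ((([t] : List (List Char)).length : Int)) - 1) ch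
              = (pvSquash [t], ((([t] : List (List Char)).length : Int)) - 1) := by
            simp [pvStepA, h2]
          rw [step, show pvStepB [t] ch = [t] by simp [pvStepB, h2]]
          exact ih [t] (by simp)
        | t :: p :: r =>
          have step : pvStepA (pvSquash (t :: p :: r), (((t :: p :: r).length : Int)) - 1) ch
              = (pvSquash ((p ++ '(' :: t ++ [')']) :: r),
                 ((((p ++ '(' :: t ++ [')']) :: r) : List (List Char)).length : Int) - 1) := by
            have hgt : ¬ (((t :: p :: r).length : Int) - 1 ≤ 0) := by
              simp
            simp only [pvStepA, h2, if_false, hgt]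
            rw [pvSquash_merge]
            simp
          rw [step, show pvStepB (t :: p :: r) ch = (p ++ '(' :: t ++ [')']) :: r by
                simp [pvStepB, h2]]
          exact ih _ (by simp)
      · match s with
        | t :: r =>
          have step : pvStepA (pvSquash (t :: r), (((t :: r).length : Int)) - 1) ch
              = (pvSquash ((t ++ [ch]) :: r), ((((t ++ [ch]) :: r) : List (List Char)).length : Int) - 1) := by
            simp [pvStepA, h1, h2, pvSquash_push]
          rw [step, show pvStepB (t :: r) ch = (t ++ [ch]) :: r by simp [pvStepB, h1, h2]]
          exact ih _ (by simp)

-- ===== VERDICT (by name: the statement is the Claim_ definition above) =====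
theorem balance_parentheses_py_spec : Claim_equal_balance_parentheses_py := by
  intro text _
  unfold Spec_balance_parentheses_py balance_parentheses_py balance_parentheses_py_alt
  obtain ⟨heq, hne⟩ := pv_inv text.toList [[]] (by simp)
  have h0 : pvSquash [[]] = [] := rfl
  have h1 : ((([[]] : List (List Char)).length : Int)) - 1 = 0 := by simp
  rw [h0, h1] at heq
  set s' := text.toList.foldl pvStepB [[]] with hs'
  rw [heq]
  rw [pvClose_eq s'.length s' le_rfl hne]
  have hlen : 1 ≤ s'.length := List.length_pos_of_ne_nil hne
  by_cases hgt : 1 < s'.length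
  · have hti : ((s'.length : Int) - 1).toNat = s'.length - 1 := by omega
    have hgz : ((s'.length : Int) - 1) > 0 := by omega
    simp [hgt, hti]
  · have h1' : s'.length = 1 := by omega
    simp [h1']
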